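-- pv_equiv track=rewrite | github.com/jonasmac16/datalad-metalad-fairmeta | datalad_metalad_fairextract/cli.py | smart_merge
-- ===== SOURCE A (Python) =====
-- def smart_merge(auto_meta: dict, curated_meta: dict, preserve_fields: set) -> dict:
--     """Merge metadata with smart field preservation.
--
--     Args:
--         auto_meta: Metadata from auto-extractor
--         curated_meta: Metadata from curated sources
--         preserve_fields: Set of field names to preserve from auto
--
--     Returns:
--         Merged metadata dictionary
--     """
--     if not preserve_fields:
--         # No smart preserve - curated overrides everything
--         return {**auto_meta, **curated_meta}
--
--     merged = {}
--     auto_fields = set(auto_meta.keys())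
--     curated_fields = set(curated_meta.keys())
--     all_fields = auto_fields | curated_fields
--
--     for field in all_fields:
--         if field in preserve_fields and field in auto_meta:
--             # Preserve from auto
--             merged[field] = auto_meta[field]
--         elif field in curated_meta:
--             # Use curated if available
--             merged[field] = curated_meta[field]
--         elif field in auto_meta:
--             # Fall back to auto
--             merged[field] = auto_meta[field]
--
--     return merged
-- ===== SOURCE B (Python) =====
-- def smart_merge(auto_meta: dict, curated_meta: dict, preserve_fields: set) -> dict:
--     """Merge metadata: curated overrides auto, then preserved fields are
--     restored from auto."""
--     merged = {**auto_meta, **curated_meta}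
--     for field in preserve_fields:
--         if field in auto_meta:
--             merged[field] = auto_meta[field]
--     return merged
-- ===== Notes on version B (the rewrite author's own statement) =====
-- stated objective: simpler
-- what changed: Replaces the empty-preserve guard plus set-union construction with per-field three-way branching by a single dict merge {**auto, **curated} followed by a selective restore of preserved auto fields; the union set and the branch chain disappear.
import Mathlib
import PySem

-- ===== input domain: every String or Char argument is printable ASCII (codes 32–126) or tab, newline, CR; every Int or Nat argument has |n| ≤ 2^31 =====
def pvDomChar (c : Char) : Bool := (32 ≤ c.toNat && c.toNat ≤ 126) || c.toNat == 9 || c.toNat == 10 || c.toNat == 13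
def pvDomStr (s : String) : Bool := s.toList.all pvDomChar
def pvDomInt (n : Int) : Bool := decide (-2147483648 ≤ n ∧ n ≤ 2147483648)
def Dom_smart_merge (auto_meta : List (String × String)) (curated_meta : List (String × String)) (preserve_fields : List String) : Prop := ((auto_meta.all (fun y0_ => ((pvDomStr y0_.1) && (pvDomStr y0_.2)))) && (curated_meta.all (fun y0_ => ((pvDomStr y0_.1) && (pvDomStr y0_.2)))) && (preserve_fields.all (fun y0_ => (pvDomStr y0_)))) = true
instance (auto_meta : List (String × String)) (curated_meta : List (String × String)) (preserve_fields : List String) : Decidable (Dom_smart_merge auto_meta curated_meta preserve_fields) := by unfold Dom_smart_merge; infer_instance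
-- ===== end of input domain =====

-- B replaces A's empty-preserve guard + key-set union + per-field three-way branch by a
-- plain dict merge (curated over auto) followed by a selective restore of preserved auto
-- fields: a simpler decomposition, same cost.


-- ===== PORT A =====
-- literal port of A; `auto_meta[field]` / `curated_meta[field]` are ported as getD with a
-- default never used, because in A each access is guarded by the corresponding membership test.
def smart_merge (auto_meta : List (String × String)) (curated_meta : List (String × String)) (preserve_fields : List String) : List (String × String) :=
  if preserve_fields = [] then
    -- {**auto_meta, **curated_meta}
    ((PySem.Dict.ofList auto_meta).update curated_meta).items
  else
    let autoD := PySem.Dict.ofList auto_meta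
    let curD := PySem.Dict.ofList curated_meta
    let auto_fields := PySem.Set.ofList autoD.keys
    let curated_fields := PySem.Set.ofList curD.keys
    let all_fields := PySem.Set.union auto_fields curated_fields
    let merged := all_fields.foldl
      (fun m field =>
        if preserve_fields.contains field && autoD.contains field then
          m.insert field (autoD.getD field "")
        else if curD.contains field then
          m.insert field (curD.getD field "")
        else if autoD.contains field then
          m.insert field (autoD.getD field "")
        else m)
      PySem.Dict.empty
    merged.items

-- ===== PORT B =====
def smart_merge_alt (auto_meta : List (String × String)) (curated_meta : List (String × String)) (preserve_fields : List String) : List (String × String) :=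
  let autoD := PySem.Dict.ofList auto_meta
  -- merged = {**auto_meta, **curated_meta}
  let merged0 := autoD.update curated_meta
  let merged := preserve_fields.foldl
    (fun m field => if autoD.contains field then m.insert field (autoD.getD field "") else m)
    merged0
  merged.items

-- ===== PRECONDITION & SPEC =====
-- Pre_ excludes association lists carrying a duplicate key: the dict parameters of the
-- Python function can never contain one (dict keys are unique), so such lists represent no
-- Python input at all.
def Pre_smart_merge (auto_meta : List (String × String)) (curated_meta : List (String × String)) (preserve_fields : List String) : Prop :=
  (auto_meta.map Prod.fst).Nodup ∧ (curated_meta.map Prod.fst).Nodup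
instance (auto_meta : List (String × String)) (curated_meta : List (String × String)) (preserve_fields : List String) : Decidable (Pre_smart_merge auto_meta curated_meta preserve_fields) := by unfold Pre_smart_merge; infer_instance
def pvWitness_smart_merge : (List (String × String)) × (List (String × String)) × List String :=
  ([("a", "1"), ("b", "2")], [("b", "3"), ("c", "4")], ["b"])

def Spec_smart_merge (auto_meta : List (String × String)) (curated_meta : List (String × String)) (preserve_fields : List String) (out : List (String × String)) : Prop := out = smart_merge_alt auto_meta curated_meta preserve_fields
instance (auto_meta : List (String × String)) (curated_meta : List (String × String)) (preserve_fields : List String) (out : List (String × String)) : Decidable (Spec_smart_merge auto_meta curated_meta preserve_fields out) := by unfold Spec_smart_merge; infer_instance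

-- ===== CLAIM (what is proved, stated in full; the proofs are below) =====
def Claim_equal_smart_merge : Prop := ∀ (auto_meta : List (String × String)) (curated_meta : List (String × String)) (preserve_fields : List String), Dom_smart_merge auto_meta curated_meta preserve_fields → Pre_smart_merge auto_meta curated_meta preserve_fields → Spec_smart_merge auto_meta curated_meta preserve_fields (smart_merge auto_meta curated_meta preserve_fields)

-- ===== LEMMAS AND PROOFS =====

-- the field list both programs enumerate, and the value both assign to each field
def allFields (auto_meta curated_meta : List (String × String)) : List String :=
  PySem.Set.union (PySem.Set.ofList (PySem.Dict.ofList auto_meta).keys)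
    (PySem.Set.ofList (PySem.Dict.ofList curated_meta).keys)

def fieldVal (auto_meta curated_meta : List (String × String)) (preserve_fields : List String) (f : String) : String :=
  if preserve_fields.contains f && (PySem.Dict.ofList auto_meta).contains f then
    (PySem.Dict.ofList auto_meta).getD f ""
  else if (PySem.Dict.ofList curated_meta).contains f then
    (PySem.Dict.ofList curated_meta).getD f ""
  else (PySem.Dict.ofList auto_meta).getD f ""

theorem mem_allFields (auto_meta curated_meta : List (String × String)) (f : String)
    (h : f ∈ allFields auto_meta curated_meta) :
    (PySem.Dict.ofList auto_meta).contains f = true ∨ (PySem.Dict.ofList curated_meta).contains f = true := by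
  unfold allFields at h
  rw [PySem.Set.mem_union] at h
  rcases h with h | h <;> rw [PySem.Set.mem_ofList] at h
  · exact Or.inl ((PySem.Dict.contains_iff_mem_keys _ _).mpr h)
  · exact Or.inr ((PySem.Dict.contains_iff_mem_keys _ _).mpr h)

theorem nodup_allFields (auto_meta curated_meta : List (String × String)) :
    (allFields auto_meta curated_meta).Nodup :=
  PySem.Set.nodup_union _ _ (PySem.Set.nodup_ofList _)

-- lookup in d.update pairs: pairs first, then d
theorem get?_update_or (pairs : List (String × String)) : ∀ (d : PySem.Dict String String) (k : String),
    (d.update pairs).get? k = Option.or ((PySem.Dict.ofList pairs).get? k) (d.get? k) := by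
  induction pairs with
  | nil => intro d k; simp [PySem.Dict.update, PySem.Dict.ofList, PySem.Dict.get?_empty, Option.or]
  | cons p rest ih =>
    intro d k
    have h1 : d.update (p :: rest) = (d.insert p.1 p.2).update rest := rfl
    have h2 : PySem.Dict.ofList (p :: rest) = (PySem.Dict.empty.insert p.1 p.2).update rest := rfl
    rw [h1, h2, ih, ih]
    rcases hR : (PySem.Dict.ofList rest).get? k with _ | v
    · by_cases hk : k = p.1 <;>
        simp [Option.or, PySem.Dict.get?_insert, hk, PySem.Dict.get?_empty]
    · simp [Option.or]

-- the preserve loop only rewrites keys already present, so the key list is unchanged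
theorem keys_presLoop (autoD : PySem.Dict String String) (l : List String) :
    ∀ (m : PySem.Dict String String), (∀ f, autoD.contains f = true → m.contains f = true) →
    (l.foldl (fun m f => if autoD.contains f then m.insert f (autoD.getD f "") else m) m).keys = m.keys := by
  induction l with
  | nil => intro m _; rfl
  | cons x xs ih =>
    intro m h
    simp only [List.foldl_cons]
    by_cases hx : autoD.contains x = true
    · rw [if_pos hx]
      have hmx : m.contains x = true := h x hx
      have hpres : ∀ f, autoD.contains f = true → (m.insert x (autoD.getD x "")).contains f = true := by
        intro f hf
        rw [PySem.Dict.contains_insert]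
        simp [h f hf]
      rw [ih _ hpres, PySem.Dict.keys_insert_of_contains _ _ hmx]
    · rw [if_neg hx]; exact ih m h

-- lookup after the preserve loop
theorem get?_presLoop (autoD : PySem.Dict String String) (l : List String) :
    ∀ (m : PySem.Dict String String) (k : String),
    (l.foldl (fun m f => if autoD.contains f then m.insert f (autoD.getD f "") else m) m).get? k
      = if k ∈ l ∧ autoD.contains k = true then some (autoD.getD k "") else m.get? k := by
  induction l with
  | nil => intro m k; simp
  | cons x xs ih =>
    intro m k
    by_cases hx : autoD.contains x = true
    · simp only [List.foldl_cons, if_pos hx, ih, PySem.Dict.get?_insert]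
      by_cases hk : k ∈ xs ∧ autoD.contains k = true
      · rw [if_pos hk, if_pos ⟨List.mem_cons_of_mem _ hk.1, hk.2⟩]
      · rw [if_neg hk]
        by_cases hkx : k = x
        · subst hkx
          rw [if_pos rfl, if_pos ⟨List.mem_cons_self, hx⟩]
        · rw [if_neg hkx,
            if_neg (by rintro ⟨hm, hc⟩
                       rcases List.mem_cons.mp hm with h | h
                       exacts [hkx h, hk ⟨h, hc⟩])]
    · simp only [List.foldl_cons, if_neg hx, ih]
      by_cases hk : k ∈ xs ∧ autoD.contains k = true
      · rw [if_pos hk, if_pos ⟨List.mem_cons_of_mem _ hk.1, hk.2⟩]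
      · rw [if_neg hk,
          if_neg (by rintro ⟨hm, hc⟩
                     rcases List.mem_cons.mp hm with h | h
                     · subst h; exact hx hc
                     · exact hk ⟨h, hc⟩)]

theorem keys_ofList_eq (pairs : List (String × String)) (h : (pairs.map Prod.fst).Nodup) :
    (PySem.Dict.ofList pairs).keys = pairs.map Prod.fst := by
  have h1 := PySem.Dict.keys_foldl_insert_key (κ := String) (ν := String) pairs Prod.fst
    (fun _ p => p.2) PySem.Dict.empty
  rw [show PySem.Dict.ofList pairs
        = pairs.foldl (fun d x => d.insert x.1 x.2) PySem.Dict.empty from rfl]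
  rw [h1]
  rw [show (PySem.Dict.empty : PySem.Dict String String).keys = ([] : List String) from rfl]
  rw [PySem.Set.update_nil_left, PySem.Set.ofList_eq_self_of_nodup _ h]

-- A's general branch builds exactly the field/value table
theorem A_branch_items (auto_meta curated_meta : List (String × String)) (preserve_fields : List String) :
    ((allFields auto_meta curated_meta).foldl
      (fun m field =>
        if preserve_fields.contains field && (PySem.Dict.ofList auto_meta).contains field then
          m.insert field ((PySem.Dict.ofList auto_meta).getD field "")
        else if (PySem.Dict.ofList curated_meta).contains field then
          m.insert field ((PySem.Dict.ofList curated_meta).getD field "")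
        else if (PySem.Dict.ofList auto_meta).contains field then
          m.insert field ((PySem.Dict.ofList auto_meta).getD field "")
        else m)
      PySem.Dict.empty).items
    = (allFields auto_meta curated_meta).map
        (fun f => (f, fieldVal auto_meta curated_meta preserve_fields f)) := by
  rw [PySem.List.foldl_congr_mem _ _
      (fun m field => m.insert field (fieldVal auto_meta curated_meta preserve_fields field)) _ ?_]
  · have := PySem.Dict.items_foldl_insert_fresh (allFields auto_meta curated_meta) id
      (fun f => fieldVal auto_meta curated_meta preserve_fields f) PySem.Dict.empty
      (by intro a _; exact PySem.Dict.contains_empty a)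
      (by simpa using nodup_allFields auto_meta curated_meta)
    simpa using this
  · intro acc f hf
    unfold fieldVal
    rcases mem_allFields _ _ _ hf with h | h <;> split_ifs with h1 hcu <;> simp_all
    rw [if_neg ?_]
    rintro ⟨hm, hc⟩
    rw [h1 hm] at hc
    exact Bool.false_ne_true hc

-- B builds exactly the same table
theorem B_items (auto_meta curated_meta : List (String × String)) (preserve_fields : List String)
    (hA : (auto_meta.map Prod.fst).Nodup) (hC : (curated_meta.map Prod.fst).Nodup) :
    smart_merge_alt auto_meta curated_meta preserve_fields
      = (allFields auto_meta curated_meta).map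
          (fun f => (f, fieldVal auto_meta curated_meta preserve_fields f)) := by
  have hbase_get : ∀ k, ((PySem.Dict.ofList auto_meta).update curated_meta).get? k
      = Option.or ((PySem.Dict.ofList curated_meta).get? k) ((PySem.Dict.ofList auto_meta).get? k) :=
    fun k => get?_update_or curated_meta _ k
  have hcontains : ∀ f, (PySem.Dict.ofList auto_meta).contains f = true →
      ((PySem.Dict.ofList auto_meta).update curated_meta).contains f = true := by
    intro f hf
    rw [PySem.Dict.contains_eq_isSome_get?, hbase_get]
    rw [PySem.Dict.contains_eq_isSome_get?] at hf
    cases hcur : (PySem.Dict.ofList curated_meta).get? f <;> simp [Option.or] <;> simp_all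
  have hbase_keys : ((PySem.Dict.ofList auto_meta).update curated_meta).keys
      = allFields auto_meta curated_meta := by
    have h1 := PySem.Dict.keys_foldl_insert_key (κ := String) (ν := String) curated_meta Prod.fst
      (fun _ p => p.2) (PySem.Dict.ofList auto_meta)
    rw [show (PySem.Dict.ofList auto_meta).update curated_meta
          = curated_meta.foldl (fun d x => d.insert x.1 x.2) (PySem.Dict.ofList auto_meta) from rfl]
    rw [h1, keys_ofList_eq auto_meta hA]
    unfold allFields
    rw [keys_ofList_eq auto_meta hA, keys_ofList_eq curated_meta hC,
      PySem.Set.ofList_eq_self_of_nodup _ hA, PySem.Set.ofList_eq_self_of_nodup _ hC]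
    rfl
  have hkeys := keys_presLoop (PySem.Dict.ofList auto_meta) preserve_fields
    ((PySem.Dict.ofList auto_meta).update curated_meta) hcontains
  have hnodup : (preserve_fields.foldl
      (fun m f => if (PySem.Dict.ofList auto_meta).contains f then
        m.insert f ((PySem.Dict.ofList auto_meta).getD f "") else m)
      ((PySem.Dict.ofList auto_meta).update curated_meta)).keys.Nodup := by
    rw [hkeys, hbase_keys]; exact nodup_allFields auto_meta curated_meta
  show (preserve_fields.foldl
      (fun m f => if (PySem.Dict.ofList auto_meta).contains f then
        m.insert f ((PySem.Dict.ofList auto_meta).getD f "") else m)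
      ((PySem.Dict.ofList auto_meta).update curated_meta)).items = _
  rw [PySem.Dict.items_eq_map_keys _ hnodup "", hkeys, hbase_keys]
  apply List.map_congr_left
  intro f _
  have hget := get?_presLoop (PySem.Dict.ofList auto_meta) preserve_fields
    ((PySem.Dict.ofList auto_meta).update curated_meta) f
  rw [PySem.Dict.getD_eq_get?_getD, hget]
  unfold fieldVal
  by_cases hp : f ∈ preserve_fields ∧ (PySem.Dict.ofList auto_meta).contains f = true
  · rw [if_pos hp, if_pos (by simp [hp.1, hp.2])]
    rfl
  · rw [if_neg hp, hbase_get f,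
      if_neg (by intro hc; exact hp ⟨by simpa using (Bool.and_eq_true _ _).mp hc |>.1,
        ((Bool.and_eq_true _ _).mp hc).2⟩)]
    by_cases hcur : (PySem.Dict.ofList curated_meta).contains f = true
    · rw [if_pos hcur, PySem.Dict.getD_eq_get?_getD]
      rcases hg : (PySem.Dict.ofList curated_meta).get? f with _ | v
      · rw [PySem.Dict.contains_eq_isSome_get?, hg] at hcur; simp at hcur
      · simp [Option.or]
    · rw [if_neg hcur, PySem.Dict.getD_eq_get?_getD]
      have hg : (PySem.Dict.ofList curated_meta).get? f = none := by
        rw [PySem.Dict.contains_eq_isSome_get?] at hcur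
        cases hx : (PySem.Dict.ofList curated_meta).get? f
        · rfl
        · rw [hx] at hcur; simp at hcur
      simp [Option.or, hg]

-- ===== VERDICT (by name: the statement is the Claim_ definition above) =====
theorem smart_merge_spec : Claim_equal_smart_merge := by
  intro auto_meta curated_meta preserve_fields _ hPre
  obtain ⟨hA, hC⟩ := hPre
  unfold Spec_smart_merge
  rw [B_items auto_meta curated_meta preserve_fields hA hC]
  unfold smart_merge
  by_cases hp : preserve_fields = []
  · subst hp
    rw [if_pos rfl, ← B_items auto_meta curated_meta [] hA hC]
    rfl
  · simp only [hp]
    exact A_branch_items auto_meta curated_meta preserve_fields
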